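-- pv_equiv track=rewrite | github.com/Vaibhavingole510/python-programming-practicals | check_equal_vowels.py | check_equal_vowels
-- ===== SOURCE A (Python) =====
-- def check_equal_vowels(s):
--     # Initialize a dictionary to count occurrences of each vowel
--     vowel_count = {'a': 0, 'e': 0, 'i': 0, 'o': 0, 'u': 0}
--
--     # Traverse through the string and count vowels
--     for char in s.lower():  # Convert string to lowercase to handle case insensitivity
--         if char in vowel_count:
--             vowel_count[char] += 1
--
--     # Filter out vowels that have a count of 0 (i.e., vowels not present in the string)
--     non_zero_vowel_counts = [count for count in vowel_count.values() if count != 0]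
--
--     # If there are no vowels in the string, consider it a valid string
--     if not non_zero_vowel_counts:
--         return "Valid String"
--
--     # Get the first vowel count to compare with others
--     first_vowel_count = non_zero_vowel_counts[0]
--
--     # Check if all non-zero vowel counts are the same
--     if all(count == first_vowel_count for count in non_zero_vowel_counts):
--         return "Valid String"
--     else:
--         return "Invalid String"
-- ===== SOURCE B (Python) =====
-- def _runs(vs):
--     # run lengths of a sorted list, computed recursively
--     if not vs:
--         return []
--     k = 1
--     while k < len(vs) and vs[k] == vs[0]:
--         k += 1
--     return [k] + _runs(vs[k:])
--
-- def check_equal_vowels(s):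
--     # Sort the vowels of the lowercased string, split into runs of equal
--     # letters, and accept iff all run lengths coincide (at most one distinct).
--     vs = sorted(c for c in s.lower() if c in "aeiou")
--     return "Valid String" if len(set(_runs(vs))) <= 1 else "Invalid String"
-- ===== Notes on version B (the rewrite author's own statement) =====
-- stated objective: alternative
-- what changed: Instead of tallying per-vowel counters in a dict, B extracts the vowels of the lowercased string, sorts them, recursively splits the sorted list into runs of equal letters, and accepts iff the set of run lengths has at most one element.
import Mathlib
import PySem

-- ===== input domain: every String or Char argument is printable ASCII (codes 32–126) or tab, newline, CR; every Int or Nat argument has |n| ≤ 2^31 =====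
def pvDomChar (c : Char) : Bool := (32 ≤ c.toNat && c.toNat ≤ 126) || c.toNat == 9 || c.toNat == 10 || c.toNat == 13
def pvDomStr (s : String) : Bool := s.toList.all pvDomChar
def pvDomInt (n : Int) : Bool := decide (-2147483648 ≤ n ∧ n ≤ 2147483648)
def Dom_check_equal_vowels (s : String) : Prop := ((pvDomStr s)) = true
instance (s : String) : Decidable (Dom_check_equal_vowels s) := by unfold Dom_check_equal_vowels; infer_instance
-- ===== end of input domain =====

-- B sorts the string's vowels and compares run lengths instead of keeping per-vowel counters (objective: alternative).

-- ===== PORT A =====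
def check_equal_vowels (s : String) : String :=
  let vowel_count : PySem.Dict Char Int :=
    PySem.Dict.ofList [('a', 0), ('e', 0), ('i', 0), ('o', 0), ('u', 0)]
  let d := (PySem.Str.lower s).toList.foldl
    (fun d ch => if d.contains ch then d.modify ch 0 (· + 1) else d) vowel_count
  let non_zero_vowel_counts := d.values.filter (fun count => count != 0)
  match non_zero_vowel_counts with
  | [] => "Valid String"
  | first_vowel_count :: _ =>
      if non_zero_vowel_counts.all (fun count => count == first_vowel_count) then
        "Valid String"
      else
        "Invalid String"

-- ===== PORT B =====
-- run lengths of a list (B's recursive _runs helper: count the prefix equal to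
-- the head, recurse on the remainder)
def pvRuns : List Char → List Int
  | [] => []
  | c :: rest =>
      ((1 + (rest.takeWhile (fun x => x == c)).length : Nat) : Int)
        :: pvRuns (rest.dropWhile (fun x => x == c))
termination_by l => l.length
decreasing_by
  simpa using Nat.lt_succ_of_le (List.length_dropWhile_le _ _)

def check_equal_vowels_alt (s : String) : String :=
  let vs := PySem.List.sorted
    ((PySem.Str.lower s).toList.filter (fun c => "aeiou".toList.contains c))
    (fun x => x) false
  if (PySem.Set.ofList (pvRuns vs)).length ≤ 1 then "Valid String"
  else "Invalid String"

-- ===== PRECONDITION & SPEC =====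
def Spec_check_equal_vowels (s : String) (out : String) : Prop := out = check_equal_vowels_alt s
instance (s : String) (out : String) : Decidable (Spec_check_equal_vowels s out) := by unfold Spec_check_equal_vowels; infer_instance

-- ===== CLAIM (what is proved, stated in full; the proofs are below) =====
def Claim_equal_check_equal_vowels : Prop := ∀ (s : String), Dom_check_equal_vowels s → Spec_check_equal_vowels s (check_equal_vowels s)

-- ===== LEMMAS AND PROOFS =====

-- the five vowels with their counts in a character list
def pvBlocks (t : List Char) : List Char :=
  (['a', 'e', 'i', 'o', 'u'].map (fun v => (v, t.count v))).flatMap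
    (fun p => List.replicate p.2 p.1)

-- A's guarded counting loop keeps the key list unchanged
lemma fold_keys (l : List Char) (d : PySem.Dict Char Int) :
    (l.foldl (fun d ch => if d.contains ch then d.modify ch 0 (· + 1) else d) d).keys
      = d.keys := by
  induction l generalizing d with
  | nil => rfl
  | cons c t ih =>
    simp only [List.foldl_cons]
    by_cases hc : d.contains c
    · rw [if_pos hc, ih, PySem.Dict.keys_modify, PySem.Dict.keys_insert_of_contains]
      simpa using hc
    · rw [if_neg hc, ih]

-- A's guarded counting loop adds the count of each contained key
lemma fold_getD (l : List Char) (d : PySem.Dict Char Int) (v : Char)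
    (hv : d.contains v = true) :
    (l.foldl (fun d ch => if d.contains ch then d.modify ch 0 (· + 1) else d) d).getD v 0
      = d.getD v 0 + l.count v := by
  induction l generalizing d with
  | nil => simp
  | cons c t ih
  · simp only [List.foldl_cons]
    by_cases hc : d.contains c
    · rw [if_pos hc, ih _ (by simp [PySem.Dict.contains_modify, hv])]
      rw [PySem.Dict.getD_modify]
      by_cases hvc : v = c
      · subst hvc; simp; ring
      · simp [hvc, Ne.symm hvc]
    · rw [if_neg hc, ih _ hv]
      have hne : c ≠ v := by
        intro h; subst h; rw [hv] at hc; exact hc rfl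
      simp [hne]

-- A's dict values are the per-vowel character counts, in vowel order
lemma values_eq (t : List Char) :
    ((t.foldl
        (fun d ch => if d.contains ch then d.modify ch 0 (· + 1) else d)
        (PySem.Dict.ofList [('a', 0), ('e', 0), ('i', 0), ('o', 0), ('u', 0)])).values
      : List Int)
      = ['a', 'e', 'i', 'o', 'u'].map (fun v => ((t.count v : Nat) : Int)) := by
  set d0 : PySem.Dict Char Int :=
    PySem.Dict.ofList [('a', 0), ('e', 0), ('i', 0), ('o', 0), ('u', 0)] with hd0
  have hkeys : (t.foldl (fun d ch => if d.contains ch then d.modify ch 0 (· + 1) else d) d0).keys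
      = ['a', 'e', 'i', 'o', 'u'] := by
    rw [fold_keys]; decide
  have hnodup : (t.foldl (fun d ch => if d.contains ch then d.modify ch 0 (· + 1) else d) d0).keys.Nodup := by
    rw [hkeys]; decide
  rw [PySem.Dict.values_eq_map_keys _ hnodup 0, hkeys]
  apply List.map_congr_left
  intro v hv
  rw [fold_getD t d0 v (by fin_cases hv <;> decide)]
  have hd : d0.getD v 0 = 0 := by fin_cases hv <;> decide
  rw [hd, zero_add]

-- takeWhile / dropWhile over a block of equal characters followed by foreign ones
lemma takeWhile_rep (v : Char) (m : Nat) (R : List Char) (hR : ∀ x ∈ R, x ≠ v) :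
    (List.replicate m v ++ R).takeWhile (fun x => x == v) = List.replicate m v := by
  induction m with
  | zero =>
    cases R with
    | nil => simp
    | cons y ys =>
      have : (y == v) = false := by
        simpa using hR y (List.mem_cons_self)
      simp [this]
  | succ n ih => simpa [List.replicate_succ, List.takeWhile] using ih

lemma dropWhile_rep (v : Char) (m : Nat) (R : List Char) (hR : ∀ x ∈ R, x ≠ v) :
    (List.replicate m v ++ R).dropWhile (fun x => x == v) = R := by
  induction m with
  | zero =>
    cases R with
    | nil => simp
    | cons y ys =>
      have : (y == v) = false := by
        simpa using hR y (List.mem_cons_self)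
      simp [this]
  | succ n ih => simpa [List.replicate_succ, List.dropWhile] using ih

-- run lengths of a concatenation of blocks of distinct characters
lemma runs_flat (ps : List (Char × Nat)) (hnd : (ps.map Prod.fst).Nodup) :
    pvRuns (ps.flatMap (fun p => List.replicate p.2 p.1))
      = (ps.map (fun p => ((p.2 : Nat) : Int))).filter (fun c => c != 0) := by
  induction ps with
  | nil => simp [pvRuns]
  | cons p rest ih =>
    obtain ⟨v, n⟩ := p
    have hnd' : (rest.map Prod.fst).Nodup := (List.nodup_cons.mp hnd).2
    have hv : v ∉ rest.map Prod.fst := (List.nodup_cons.mp hnd).1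
    have hR : ∀ x ∈ rest.flatMap (fun p => List.replicate p.2 p.1), x ≠ v := by
      intro x hx hxv
      subst hxv
      obtain ⟨q, hq, hxq⟩ := List.mem_flatMap.mp hx
      exact hv (List.mem_map.mpr ⟨q, hq, (List.eq_of_mem_replicate hxq).symm⟩)
    cases n with
    | zero => simpa using ih hnd'
    | succ m =>
      have hflat : ((v, m + 1) :: rest).flatMap (fun p => List.replicate p.2 p.1)
          = v :: (List.replicate m v ++ rest.flatMap (fun p => List.replicate p.2 p.1)) := by
        simp [List.flatMap_cons, List.replicate_succ]
      rw [hflat]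
      rw [pvRuns, takeWhile_rep v m _ hR, dropWhile_rep v m _ hR, ih hnd']
      have hne : (((m : Int) + 1) != 0) = true := by
        simp only [bne_iff_ne, ne_eq]
        omega
      simp [hne, Nat.add_comm]

-- B's sorted vowel list is the concatenation of the vowel blocks
lemma sorted_eq_blocks (t : List Char) :
    PySem.List.sorted (t.filter (fun c => "aeiou".toList.contains c)) (fun x => x) false
      = pvBlocks t := by
  apply PySem.List.sorted_id_eq_of_perm_of_pairwise
  · -- permutation, via equal counts
    rw [List.perm_iff_count]
    intro b
    by_cases hb : b ∈ ['a', 'e', 'i', 'o', 'u']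
    · have hf : b ∈ t.filter (fun c => "aeiou".toList.contains c) ↔ b ∈ t := by
        simp [List.mem_filter]
        intro _
        fin_cases hb <;> decide
      rw [List.count_filter (by fin_cases hb <;> decide)]
      fin_cases hb <;>
        simp [pvBlocks, List.flatMap_cons, List.count_append, List.count_replicate]
    · have h1 : b ∉ t.filter (fun c => "aeiou".toList.contains c) := by
        intro h
        have := (List.mem_filter.mp h).2
        simp at this
        rcases this with h | h | h | h | h <;> subst h <;> simp at hb
      have h2 : b ∉ pvBlocks t := by
        intro h
        obtain ⟨q, hq, hbq⟩ := List.mem_flatMap.mp h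
        have := List.eq_of_mem_replicate hbq
        subst this
        obtain ⟨w, hw, hwq⟩ := List.mem_map.mp hq
        have : q.1 = w := by rw [← hwq]
        rw [this] at hb
        exact hb hw
      rw [List.count_eq_zero_of_not_mem h1, List.count_eq_zero_of_not_mem h2]
  · -- the blocks are ordered
    have : ∀ (ps : List (Char × Nat)), (ps.map Prod.fst).Pairwise (· < ·) →
        (ps.flatMap (fun p => List.replicate p.2 p.1)).Pairwise (· ≤ ·) := by
      intro ps
      induction ps with
      | nil => intro _; simp
      | cons p rest ih =>
        intro h
        rw [List.map_cons, List.pairwise_cons] at h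
        rw [List.flatMap_cons]
        apply List.pairwise_append.mpr
        refine ⟨List.pairwise_replicate.mpr (by simp), ih h.2, ?_⟩
        intro x hx y hy
        have hxv : x = p.1 := List.eq_of_mem_replicate hx
        obtain ⟨q, hq, hyq⟩ := List.mem_flatMap.mp hy
        have hyv : y = q.1 := List.eq_of_mem_replicate hyq
        subst hxv; subst hyv
        exact le_of_lt (h.1 q.1 (List.mem_map.mpr ⟨q, hq, rfl⟩))
    apply this
    have hfst : ((['a', 'e', 'i', 'o', 'u'].map (fun v => (v, t.count v))).map Prod.fst)
        = ['a', 'e', 'i', 'o', 'u'] := by simp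
    rw [hfst]
    decide

-- "at most one distinct element" is "all elements equal the head"
lemma set_len_le_one (L : List Int) :
    (if (PySem.Set.ofList L).length ≤ 1 then "Valid String" else "Invalid String")
      = (match L with
          | [] => "Valid String"
          | f :: _ => if L.all (fun c => c == f) then "Valid String" else "Invalid String") := by
  cases L with
  | nil => simp [PySem.Set.ofList]
  | cons f rest =>
    have hiff : (PySem.Set.ofList (f :: rest)).length ≤ 1 ↔
        (f :: rest).all (fun c => c == f) = true := by
      rw [PySem.Set.ofList_cons]
      constructor
      · intro h
        have hemp : PySem.Set.discard (PySem.Set.ofList rest) f = [] := by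
          cases he : PySem.Set.discard (PySem.Set.ofList rest) f with
          | nil => rfl
          | cons a l => simp [he] at h
        simp only [List.all_cons, beq_self_eq_true, Bool.true_and, List.all_eq_true]
        intro x hx
        by_contra hne
        have hxmem : x ∈ PySem.Set.discard (PySem.Set.ofList rest) f :=
          (PySem.Set.mem_discard _ _ _).mpr ⟨((PySem.Set.mem_ofList ..).mpr hx), by simpa using hne⟩
        rw [hemp] at hxmem
        simp at hxmem
      · intro h
        have hemp : PySem.Set.discard (PySem.Set.ofList rest) f = [] := by
          apply List.eq_nil_iff_forall_not_mem.mpr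
          intro x hx
          obtain ⟨hx1, hx2⟩ := (PySem.Set.mem_discard _ _ _).mp hx
          have := List.all_eq_true.mp h x (List.mem_cons_of_mem _ (((PySem.Set.mem_ofList ..).mp hx1)))
          exact hx2 (by simpa using this)
        rw [hemp]
        simp
    by_cases h : (f :: rest).all (fun c => c == f) = true
    · simp [hiff.mpr h, h]
    · have : ¬ (PySem.Set.ofList (f :: rest)).length ≤ 1 := fun hc => h (hiff.mp hc)
      simp [this, h]

-- ===== VERDICT (by name: the statement is the Claim_ definition above) =====
theorem check_equal_vowels_spec : Claim_equal_check_equal_vowels := by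
  intro s _
  unfold Spec_check_equal_vowels check_equal_vowels check_equal_vowels_alt
  set t := (PySem.Str.lower s).toList with ht
  dsimp only
  rw [values_eq, sorted_eq_blocks, set_len_le_one]
  unfold pvBlocks
  have hnd : ((['a', 'e', 'i', 'o', 'u'].map (fun v => (v, t.count v))).map Prod.fst).Nodup := by
    have hfst : ((['a', 'e', 'i', 'o', 'u'].map (fun v => (v, t.count v))).map Prod.fst)
        = ['a', 'e', 'i', 'o', 'u'] := by simp
    rw [hfst]; decide
  rw [runs_flat _ hnd]
  simp
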